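-- pv_equiv track=rewrite | github.com/mading0817/TexasHoldem | v3/core/pot/pot_calculator.py | calculate_contribution_levels
-- ===== SOURCE A (Python) =====
-- from typing import Dict, List, Tuple
--
-- def calculate_contribution_levels(player_bets: Dict[str, int]) -> List[Tuple[int, List[str]]]:
--     """
--     计算贡献层级
--
--     Args:
--         player_bets: 玩家下注记录
--
--     Returns:
--         层级列表 [(level_amount, players_at_level)]
--     """
--     if not player_bets:
--         return []
--
--     # 按下注金额分组
--     bet_groups = {}
--     for player_id, bet_amount in player_bets.items():
--         if bet_amount not in bet_groups:
--             bet_groups[bet_amount] = []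
--         bet_groups[bet_amount].append(player_id)
--
--     # 按金额排序
--     sorted_levels = sorted(bet_groups.items())
--
--     contribution_levels = []
--     for bet_amount, players in sorted_levels:
--         contribution_levels.append((bet_amount, players))
--
--     return contribution_levels
-- ===== SOURCE B (Python) =====
-- def calculate_contribution_levels(player_bets):
--     levels = []
--     for player_id, amount in sorted(player_bets.items(), key=lambda kv: kv[1]):
--         if levels and levels[-1][0] == amount:
--             levels[-1][1].append(player_id)
--         else:
--             levels.append((amount, [player_id]))
--     return levels
-- ===== Notes on version B (the rewrite author's own statement) =====
-- stated objective: simpler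
-- what changed: Instead of building an amount->players bucket dict, sorting its items and copying them out, B stably sorts the items by amount once and emits the groups in a single linear pass over the sorted list, never maintaining an intermediate dict.
import Mathlib
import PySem

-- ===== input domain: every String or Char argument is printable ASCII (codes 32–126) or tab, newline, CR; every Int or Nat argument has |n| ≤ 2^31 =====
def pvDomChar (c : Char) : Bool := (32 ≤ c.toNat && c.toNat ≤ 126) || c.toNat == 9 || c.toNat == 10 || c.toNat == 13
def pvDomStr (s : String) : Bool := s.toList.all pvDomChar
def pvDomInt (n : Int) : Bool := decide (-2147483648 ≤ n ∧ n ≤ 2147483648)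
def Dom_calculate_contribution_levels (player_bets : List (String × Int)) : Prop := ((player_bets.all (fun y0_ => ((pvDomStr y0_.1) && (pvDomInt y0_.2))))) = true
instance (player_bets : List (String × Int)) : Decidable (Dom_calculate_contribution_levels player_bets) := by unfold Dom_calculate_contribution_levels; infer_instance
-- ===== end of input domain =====

-- B replaces A's bucket-dict + sort-of-groups pipeline by one stable sort of the items
-- followed by a single linear grouping pass (objective: simpler).


-- ===== PORT A =====
def calculate_contribution_levels (player_bets : List (String × Int)) : List (Int × List String) :=
  let items := (PySem.Dict.ofList player_bets).items
  if items = [] then []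
  else
    let bet_groups : PySem.Dict Int (List String) :=
      items.foldl (fun g pi => g.modify pi.2 [] (fun l => l ++ [pi.1])) PySem.Dict.empty
    -- bet_groups has distinct keys, so Python's tuple sort of its items orders by the amount alone
    let sorted_levels := PySem.List.sorted bet_groups.items (fun x => x.1) false
    sorted_levels.foldl (fun acc x => acc ++ [(x.1, x.2)]) []

-- ===== PORT B =====
-- the loop body of Source B: append to the last level's player list, or open a new level
def pvStep (levels : List (Int × List String)) (kv : String × Int) : List (Int × List String) :=
  match levels.getLast? with
  | some (b, ps) => if b = kv.2 then levels.dropLast ++ [(b, ps ++ [kv.1])]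
                    else levels ++ [(kv.2, [kv.1])]
  | none => [(kv.2, [kv.1])]

def calculate_contribution_levels_alt (player_bets : List (String × Int)) : List (Int × List String) :=
  (PySem.List.sorted (PySem.Dict.ofList player_bets).items (fun kv => kv.2) false).foldl pvStep []

-- ===== PRECONDITION & SPEC =====
def Spec_calculate_contribution_levels (player_bets : List (String × Int)) (out : List (Int × List String)) : Prop := out = calculate_contribution_levels_alt player_bets
instance (player_bets : List (String × Int)) (out : List (Int × List String)) : Decidable (Spec_calculate_contribution_levels player_bets out) := by unfold Spec_calculate_contribution_levels; infer_instance

-- ===== CLAIM (what is proved, stated in full; the proofs are below) =====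
def Claim_equal_calculate_contribution_levels : Prop := ∀ (player_bets : List (String × Int)), Dom_calculate_contribution_levels player_bets → Spec_calculate_contribution_levels player_bets (calculate_contribution_levels player_bets)

-- ===== LEMMAS AND PROOFS =====

-- players of ys betting exactly a, in order
def pvPluck (a : Int) (ys : List (String × Int)) : List String :=
  (ys.filter (fun p => p.2 == a)).map (fun p => p.1)

-- the common normal form of both pipelines
def pvCanon (ys : List (String × Int)) : List (Int × List String) :=
  (PySem.List.sorted (PySem.Set.ofList (ys.map (fun p => p.2))) (fun a => a) false).map
    (fun a => (a, pvPluck a ys))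

theorem pvPluck_append (a : Int) (ys : List (String × Int)) (x : String × Int) :
    pvPluck a (ys ++ [x]) = pvPluck a ys ++ (if x.2 == a then [x.1] else []) := by
  simp only [pvPluck, List.filter_append, List.map_append]
  by_cases h : (x.2 == a) = true <;> simp [h]

theorem pvSet_ofList_sublist {α : Type} [BEq α] (l : List α) :
    (PySem.Set.ofList l : List α).Sublist l := by
  induction l using List.reverseRecOn with
  | nil => simp [PySem.Set.ofList, PySem.Set.empty]
  | append_singleton l x ih =>
    have : PySem.Set.ofList (l ++ [x]) = PySem.Set.add (PySem.Set.ofList l) x := by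
      simp [PySem.Set.ofList]
    rw [this, PySem.Set.add]
    split
    · exact ih.trans (List.sublist_append_left l [x])
    · exact List.Sublist.append ih (List.Sublist.refl [x])

theorem pvSet_ofList_eq_nil {α : Type} [BEq α] [LawfulBEq α] (l : List α)
    (h : PySem.Set.ofList l = ([] : List α)) : l = [] := by
  cases l with
  | nil => rfl
  | cons x t =>
    exfalso
    have hx : x ∈ PySem.Set.ofList (x :: t) := (PySem.Set.mem_ofList _ _).mpr (List.mem_cons_self)
    rw [h] at hx
    exact (List.not_mem_nil) hx

-- ===== A side =====
theorem pvA_items (ys : List (String × Int)) :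
    ((ys.foldl (fun g pi => g.modify pi.2 [] (fun l => l ++ [pi.1]))
        (PySem.Dict.empty : PySem.Dict Int (List String)))).items
      = (PySem.Set.ofList (ys.map (fun p => p.2))).map (fun a => (a, pvPluck a ys)) := by
  have hkeys := PySem.Dict.keys_foldl_modify_key ys (fun p : String × Int => p.2) ([] : List String)
      (fun _ pi => (fun l => l ++ [pi.1])) (PySem.Dict.empty : PySem.Dict Int (List String))
  have hnd := PySem.Dict.nodup_keys_foldl_modify_key ys (fun p : String × Int => p.2) ([] : List String)
      (fun _ pi => (fun l => l ++ [pi.1])) (PySem.Dict.empty : PySem.Dict Int (List String))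
      (by simp [PySem.Dict.keys_empty])
  have hgetD : ∀ c : Int,
      ((ys.foldl (fun g pi => g.modify pi.2 [] (fun l => l ++ [pi.1]))
        (PySem.Dict.empty : PySem.Dict Int (List String)))).getD c [] = pvPluck c ys := by
    intro c
    have hm : ys.foldl (fun g pi => g.modify pi.2 [] (fun l => l ++ [pi.1]))
        (PySem.Dict.empty : PySem.Dict Int (List String))
        = (ys.map (fun p => (p.2, p.1))).foldl (fun d p => d.modify p.1 [] (fun l => l ++ [p.2]))
          (PySem.Dict.empty : PySem.Dict Int (List String)) := by
      rw [List.foldl_map]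
    rw [hm, PySem.Dict.getD_foldl_modify_append]
    simp [pvPluck, List.filter_map, Function.comp_def]
  rw [PySem.Dict.items_eq_map_keys _ hnd ([] : List String)]
  rw [hkeys, PySem.Dict.keys_empty, PySem.Set.update_nil_left]
  exact List.map_congr_left (fun a _ => by rw [hgetD a])

theorem pvA_canon (ys : List (String × Int)) :
    PySem.List.sorted
        ((ys.foldl (fun g pi => g.modify pi.2 [] (fun l => l ++ [pi.1]))
          (PySem.Dict.empty : PySem.Dict Int (List String)))).items (fun x => x.1) false
      = pvCanon ys := by
  rw [pvA_items]
  apply PySem.List.sorted_eq_of_perm_of_pairwise_lt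
  · exact (PySem.List.sorted_perm _ _ _).map _
  · exact List.Pairwise.map _ (fun a b h => by simpa using h)
      (PySem.List.sorted_ofList_pairwise_lt (ys.map (fun p => p.2)))

-- ===== B side =====
theorem pvFilter_insertBy_ne (a : Int) (bf : (String × Int) → (String × Int) → Bool)
    (x : String × Int) (hx : (x.2 == a) = false) (acc : List (String × Int)) :
    (PySem.List.insertBy bf x acc).filter (fun p => p.2 == a)
      = acc.filter (fun p => p.2 == a) := by
  induction acc with
  | nil => simp [PySem.List.insertBy, hx]
  | cons y t ih =>
    rw [PySem.List.insertBy]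
    split
    · simp [hx]
    · simp only [List.filter_cons, ih]

theorem pvFilter_insertBy_eq (a : Int) (x : String × Int) (hx : x.2 = a)
    (acc : List (String × Int)) (hs : acc.Pairwise (fun u v => u.2 ≤ v.2)) :
    (PySem.List.insertBy (fun u v => decide (u.2 < v.2)) x acc).filter (fun p => p.2 == a)
      = acc.filter (fun p => p.2 == a) ++ [x] := by
  induction acc with
  | nil => simp [PySem.List.insertBy, hx]
  | cons y t ih =>
    rw [PySem.List.insertBy]
    rw [List.pairwise_cons] at hs
    split
    · rename_i hlt
      have hnil : (y :: t).filter (fun p => p.2 == a) = [] := by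
        apply List.filter_eq_nil_iff.mpr
        intro q hq
        have : y.2 ≤ q.2 := by
          rcases List.mem_cons.mp hq with h | h
          · rw [h]
          · exact hs.1 q h
        have : x.2 < q.2 := lt_of_lt_of_le (by simpa using hlt) this
        simp [hx] at this ⊢
        omega
      rw [hnil]
      simp [hx, hnil]
    · simp only [List.filter_cons, ih hs.2]
      split <;> simp

-- stability: filtering one amount out of the stable sort gives the original subsequence
theorem pvFilter_sorted (ys : List (String × Int)) (a : Int) :
    (PySem.List.sorted ys (fun p => p.2) false).filter (fun p => p.2 == a)
      = ys.filter (fun p => p.2 == a) := by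
  induction ys using List.reverseRecOn with
  | nil => simp
  | append_singleton ys x ih =>
    have h1 : PySem.List.sorted (ys ++ [x]) (fun p : String × Int => p.2) false
        = PySem.List.insertBy (fun u v => decide (u.2 < v.2)) x
            (PySem.List.sorted ys (fun p : String × Int => p.2) false) := by
      rw [PySem.List.sorted_eq_foldl_insertBy, PySem.List.sorted_eq_foldl_insertBy,
        List.foldl_append]
      rfl
    by_cases hx : (x.2 == a) = true
    · rw [h1, pvFilter_insertBy_eq a x (by simpa using hx) _
        (PySem.List.sorted_pairwise ys (fun p : String × Int => p.2)), ih]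
      simp [List.filter_append, hx]
    · rw [h1, pvFilter_insertBy_ne a _ x (by simpa using hx), ih]
      simp [List.filter_append, hx]

theorem pvPairwise_lt (K : List Int) (hle : K.Pairwise (· ≤ ·)) (hnd : K.Nodup) :
    K.Pairwise (· < ·) := by
  induction K with
  | nil => exact List.Pairwise.nil
  | cons a t ih =>
    rw [List.pairwise_cons] at *
    rw [List.nodup_cons] at hnd
    exact ⟨fun b hb => lt_of_le_of_ne (hle.1 b hb) (fun h => hnd.1 (h ▸ hb)),
      ih hle.2 hnd.2⟩

theorem pvSet_ofList_append_singleton {α : Type} [BEq α] (l : List α) (x : α) :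
    PySem.Set.ofList (l ++ [x]) = PySem.Set.add (PySem.Set.ofList l) x := by
  simp [PySem.Set.ofList]

theorem pvFoldl_step (zs : List (String × Int)) (hs : zs.Pairwise (fun u v => u.2 ≤ v.2)) :
    zs.foldl pvStep []
      = (PySem.Set.ofList (zs.map (fun p => p.2))).map (fun a => (a, pvPluck a zs)) := by
  induction zs using List.reverseRecOn with
  | nil => simp [PySem.Set.ofList, PySem.Set.empty]
  | append_singleton zs x ih =>
    rw [List.pairwise_append] at hs
    obtain ⟨hzs, -, hcross⟩ := hs
    have hcross' : ∀ u ∈ zs, u.2 ≤ x.2 := fun u hu => hcross u hu x (List.mem_cons_self)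
    have hfold : (zs ++ [x]).foldl pvStep [] = pvStep (zs.foldl pvStep []) x := by
      rw [List.foldl_append]; rfl
    have hpa : ∀ a : Int, pvPluck a (zs ++ [x])
        = pvPluck a zs ++ (if x.2 == a then [x.1] else []) := fun a => pvPluck_append a zs x
    set K := (PySem.Set.ofList (zs.map (fun p => p.2)) : List Int) with hK
    have hmemK : ∀ a, a ∈ K ↔ a ∈ zs.map (fun p => p.2) := fun a =>
      PySem.Set.mem_ofList _ _
    have hKle : K.Pairwise (· ≤ ·) := by
      refine List.Pairwise.sublist (pvSet_ofList_sublist _) ?_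
      exact List.pairwise_map.mpr hzs
    have hKlt : K.Pairwise (· < ·) := pvPairwise_lt K hKle (PySem.Set.nodup_ofList _)
    have hKnil : K = [] → zs = [] := fun h => by
      have := pvSet_ofList_eq_nil (zs.map (fun p => p.2)) (by rw [← hK]; exact h)
      exact List.map_eq_nil_iff.mp this
    have hkeys : (PySem.Set.ofList ((zs ++ [x]).map (fun p => p.2)) : List Int)
        = PySem.Set.add K x.2 := by
      rw [List.map_append]
      simp only [List.map_cons, List.map_nil]
      rw [pvSet_ofList_append_singleton]
    clear_value K
    rw [hfold, ih hzs, hkeys]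
    by_cases hmem : x.2 ∈ zs.map (fun p => p.2)
    · -- the amount already has a level; it is necessarily the last one
      have hcont : PySem.Set.contains K x.2 = true :=
        (PySem.Set.contains_iff _ _).mpr ((hmemK _).mpr hmem)
      rw [PySem.Set.add, if_pos hcont]
      rcases List.eq_nil_or_concat K with rfl | ⟨K0, klast, rfl⟩
      · exact absurd ((hmemK _).mpr hmem) (List.not_mem_nil)
      · simp only [List.concat_eq_append] at hmemK hKle hKlt hcross' ⊢
        rw [List.pairwise_append] at hKlt
        have hlast : klast = x.2 := by
          have h1 : klast ≤ x.2 := by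
            have : klast ∈ zs.map (fun p => p.2) :=
              (hmemK _).mp (List.mem_append_right _ (List.mem_cons_self))
            obtain ⟨u, hu, hu2⟩ := List.mem_map.mp this
            exact hu2 ▸ hcross' u hu
          rcases List.mem_append.mp ((hmemK _).mpr hmem) with h0 | h0
          · have := hKlt.2.2 x.2 h0 klast (List.mem_cons_self)
            omega
          · have := List.mem_singleton.mp h0
            omega
        subst hlast
        have hsplit : (K0 ++ [x.2]).map (fun a => (a, pvPluck a zs))
            = K0.map (fun a => (a, pvPluck a zs)) ++ [(x.2, pvPluck x.2 zs)] := by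
          simp
        simp only [pvStep, hsplit, List.getLast?_concat]
        rw [if_pos trivial, List.dropLast_concat]
        conv_rhs => rw [List.map_append]
        congr 1
        · refine List.map_congr_left (fun a ha => ?_)
          have hne : (x.2 == a) = false := by
            have := hKlt.2.2 a ha x.2 (List.mem_cons_self)
            simp only [beq_eq_false_iff_ne, ne_eq]
            omega
          rw [hpa a, hne]
          simp
        · simp [hpa]
    · -- a fresh (maximal) amount opens a new level at the end
      have hcont : PySem.Set.contains K x.2 = false := by
        rw [Bool.eq_false_iff]
        intro h
        exact hmem ((hmemK _).mp ((PySem.Set.contains_iff _ _).mp h))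
      rw [PySem.Set.add, hcont]
      simp only [Bool.false_eq_true, if_false]
      have hplx : pvPluck x.2 zs = [] := by
        apply List.map_eq_nil_iff.mpr
        apply List.filter_eq_nil_iff.mpr
        intro q hq hq2
        exact hmem (List.mem_map.mpr ⟨q, hq, by simpa using hq2.symm⟩)
      have hmapK : K.map (fun a => (a, pvPluck a (zs ++ [x])))
          = K.map (fun a => (a, pvPluck a zs)) := by
        refine List.map_congr_left (fun a ha => ?_)
        have hne : (x.2 == a) = false := by
          have : a ∈ zs.map (fun p => p.2) := (hmemK _).mp ha
          simp only [beq_eq_false_iff_ne, ne_eq]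
          intro h
          exact hmem (h ▸ this)
        rw [hpa a, hne]
        simp
      rcases List.eq_nil_or_concat K with rfl | ⟨K0, klast, rfl⟩
      · have hz : zs = [] := hKnil rfl
        subst hz
        simp [pvStep, pvPluck]
      · simp only [List.concat_eq_append] at hmemK hmapK ⊢
        have hklast : klast ≠ x.2 := by
          intro h
          exact hmem ((hmemK _).mp (h ▸ List.mem_append_right _ (List.mem_cons_self)))
        have hsplit : (K0 ++ [klast]).map (fun a => (a, pvPluck a zs))
            = K0.map (fun a => (a, pvPluck a zs)) ++ [(klast, pvPluck klast zs)] := by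
          simp
        simp only [pvStep, hsplit, List.getLast?_concat]
        rw [if_neg hklast, ← hsplit, ← hmapK]
        conv_rhs => rw [List.map_append]
        congr 1
        simp [hpa, hplx]

theorem pvB_canon (ys : List (String × Int)) :
    (PySem.List.sorted ys (fun kv => kv.2) false).foldl pvStep [] = pvCanon ys := by
  have h1 : (PySem.List.sorted ys (fun kv : String × Int => kv.2) false).Pairwise
      (fun u v => u.2 ≤ v.2) := PySem.List.sorted_pairwise ys _
  rw [pvFoldl_step _ h1]
  have hf : (fun a => (a, pvPluck a (PySem.List.sorted ys (fun kv : String × Int => kv.2) false)))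
      = (fun a : Int => (a, pvPluck a ys)) := by
    funext a
    simp only [pvPluck, pvFilter_sorted]
  have hkeys : PySem.List.sorted
      (PySem.Set.ofList (ys.map (fun p => p.2))) (fun a => a) false
      = (PySem.Set.ofList ((PySem.List.sorted ys (fun kv : String × Int => kv.2) false).map
          (fun p => p.2)) : List Int) := by
    apply PySem.List.sorted_eq_of_perm_of_pairwise_lt
    · apply (List.perm_ext_iff_of_nodup (PySem.Set.nodup_ofList _) (PySem.Set.nodup_ofList _)).mpr
      intro a
      rw [PySem.Set.mem_ofList, PySem.Set.mem_ofList]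
      exact List.Perm.mem_iff (List.Perm.map _ (PySem.List.sorted_perm ys _ false))
    · apply pvPairwise_lt _ _ (PySem.Set.nodup_ofList _)
      refine List.Pairwise.sublist (pvSet_ofList_sublist _) ?_
      exact List.pairwise_map.mpr h1
  rw [hf, pvCanon, hkeys]

-- ===== VERDICT (by name: the statement is the Claim_ definition above) =====
theorem calculate_contribution_levels_spec : Claim_equal_calculate_contribution_levels := by
  intro pb _
  unfold Spec_calculate_contribution_levels calculate_contribution_levels calculate_contribution_levels_alt
  rw [pvB_canon]
  by_cases h : (PySem.Dict.ofList pb).items = []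
  · simp [h, pvCanon, PySem.Set.ofList, PySem.Set.empty, PySem.List.sorted_eq_nil_iff]
  · simp only [h, pvA_canon, PySem.List.foldl_append_singleton_eq_map]
    simp
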